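-- pv_equiv track=rewrite | github.com/Varatheepan/SOTR | core50_hybrid/utils/mnist_utils.py | replay_data_generator
-- ===== SOURCE A (Python) =====
-- def buffer_indices_generator(replay_buffer_size, number_of_splits):
-- 	indices = []
-- 	quotient = replay_buffer_size // number_of_splits
-- 	reminder = replay_buffer_size % number_of_splits
-- 	for i in range(number_of_splits - reminder):
-- 		indices.append(quotient)
-- 	for i in range(reminder):
-- 		indices.append(quotient + 1)
-- 	return indices
--
-- def replay_data_generator(data, replay_data, replay_buffer_size, task_id):
-- 	number_of_splits = task_id + 1
-- 	new_indices = buffer_indices_generator(replay_buffer_size, number_of_splits)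
-- 	if task_id == 0:
-- 		replay_data += data[:replay_buffer_size]
-- 	else:
-- 		old_indices = buffer_indices_generator(replay_buffer_size, number_of_splits - 1)
-- 		removal_starting_index = 0
-- 		for j in range(len(old_indices)):
-- 			no_of_samples_removed = old_indices[j] - new_indices[j]
-- 			removal_starting_index += new_indices[j]
-- 			del replay_data[removal_starting_index : removal_starting_index + no_of_samples_removed]
-- 		replay_data += data[:new_indices[-1]]
-- 	return replay_data
-- ===== SOURCE B (Python) =====
-- def replay_data_generator(data, replay_data, replay_buffer_size, task_id):
--     number_of_splits = task_id + 1
--     sizes = lambda m: [replay_buffer_size // m +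
--                        (1 if j >= m - replay_buffer_size % m else 0)
--                        for j in range(m)]
--     new_indices = sizes(number_of_splits)
--     if task_id == 0:
--         replay_data += data[:replay_buffer_size]
--         return replay_data
--     old_indices = sizes(number_of_splits - 1)
--     rebuilt = []
--     start = 0
--     for j in range(number_of_splits - 1):
--         rebuilt += replay_data[start:start + new_indices[j]]
--         start += old_indices[j]
--     rebuilt += replay_data[start:]
--     rebuilt += data[:new_indices[-1]]
--     replay_data[:] = rebuilt
--     return replay_data
-- ===== Notes on version B (the rewrite author's own statement) =====
-- stated objective: simpler
-- what changed: B computes the split sizes by a closed-form formula instead of two append loops, and for task_id>0 rebuilds the buffer by collecting slices at fixed offsets into the original list instead of A's in-place slice deletion with a shifting cursor.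
-- outside the precondition, e.g. on replay_data_generator([-1], [-1, 2], -2, 6939): A returns [-1, 2], B returns [-1, -1, 2]
import Mathlib
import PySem

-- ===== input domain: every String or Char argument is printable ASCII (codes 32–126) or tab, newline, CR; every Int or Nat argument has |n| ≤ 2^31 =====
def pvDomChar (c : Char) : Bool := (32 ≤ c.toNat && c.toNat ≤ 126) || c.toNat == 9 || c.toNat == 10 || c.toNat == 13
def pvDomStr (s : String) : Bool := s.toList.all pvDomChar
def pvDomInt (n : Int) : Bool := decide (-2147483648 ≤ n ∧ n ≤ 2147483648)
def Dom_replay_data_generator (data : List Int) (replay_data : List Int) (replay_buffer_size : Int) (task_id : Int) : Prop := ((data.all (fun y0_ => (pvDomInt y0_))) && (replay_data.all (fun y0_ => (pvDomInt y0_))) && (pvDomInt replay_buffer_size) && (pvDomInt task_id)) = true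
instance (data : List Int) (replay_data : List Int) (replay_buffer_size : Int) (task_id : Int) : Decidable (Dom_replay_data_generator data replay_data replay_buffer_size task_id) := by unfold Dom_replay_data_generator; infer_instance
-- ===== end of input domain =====

-- B rebuilds the replay buffer from fixed offsets into the ORIGINAL list (slice-and-collect, with closed-form
-- split sizes) instead of A's in-place deletion with a shifting cursor; objective: simpler. Python A and B both
-- mutate replay_data in place; the equivalence proved here is about the RETURN value only.

-- ===== PORT A =====
def buffer_indices_generator (replay_buffer_size : Int) (number_of_splits : Int) : List Int :=
  let quotient := PySem.Int.floordiv replay_buffer_size number_of_splits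
  let reminder := PySem.Int.mod replay_buffer_size number_of_splits
  let indices := (PySem.List.pyRange 0 (number_of_splits - reminder) 1).foldl
      (fun acc _ => acc ++ [quotient]) ([] : List Int)
  (PySem.List.pyRange 0 reminder 1).foldl (fun acc _ => acc ++ [quotient + 1]) indices

def replay_data_generator (data : List Int) (replay_data : List Int) (replay_buffer_size : Int) (task_id : Int) : List Int :=
  let number_of_splits := task_id + 1
  let new_indices := buffer_indices_generator replay_buffer_size number_of_splits
  if task_id == 0 then
    replay_data ++ PySem.List.slice data none (some replay_buffer_size)
  else
    let old_indices := buffer_indices_generator replay_buffer_size (number_of_splits - 1)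
    let st := (PySem.List.pyRange 0 (old_indices.length : Int) 1).foldl
      (fun (st : List Int × Int) j =>
        let no_of_samples_removed :=
          PySem.List.pyGetD old_indices j 0 - PySem.List.pyGetD new_indices j 0
        let removal_starting_index := st.2 + PySem.List.pyGetD new_indices j 0
        -- del replay_data[a : b] has no PySem primitive; ported exactly: Python resolves both bounds
        -- with the slice rule (clampIdx) and keeps l[:a'] ++ l[max a' b':] (a no-op when b' < a')
        (st.1.take (PySem.List.clampIdx st.1.length removal_starting_index) ++
           st.1.drop (max (PySem.List.clampIdx st.1.length removal_starting_index)
             (PySem.List.clampIdx st.1.length (removal_starting_index + no_of_samples_removed))),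
         removal_starting_index))
      (replay_data, 0)
    st.1 ++ PySem.List.slice data none (some (PySem.List.pyGetD new_indices (-1) 0))

-- ===== PORT B =====
-- closed-form split sizes: sizes(m)[j] = b//m + (1 if j >= m - b%m else 0)
def pvSizes (replay_buffer_size : Int) (m : Int) : List Int :=
  (PySem.List.pyRange 0 m 1).map (fun j =>
    PySem.Int.floordiv replay_buffer_size m +
      (if m - PySem.Int.mod replay_buffer_size m ≤ j then 1 else 0))

def replay_data_generator_alt (data : List Int) (replay_data : List Int) (replay_buffer_size : Int) (task_id : Int) : List Int :=
  let number_of_splits := task_id + 1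
  let new_indices := pvSizes replay_buffer_size number_of_splits
  if task_id == 0 then
    replay_data ++ PySem.List.slice data none (some replay_buffer_size)
  else
    let old_indices := pvSizes replay_buffer_size (number_of_splits - 1)
    let st := (PySem.List.pyRange 0 (number_of_splits - 1) 1).foldl
      (fun (st : List Int × Int) j =>
        (st.1 ++ PySem.List.slice replay_data (some st.2)
                   (some (st.2 + PySem.List.pyGetD new_indices j 0)),
         st.2 + PySem.List.pyGetD old_indices j 0))
      (([] : List Int), 0)
    st.1 ++ PySem.List.slice replay_data (some st.2) none ++
      PySem.List.slice data none (some (PySem.List.pyGetD new_indices (-1) 0))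

-- ===== PRECONDITION & SPEC =====
-- Pre_ excludes task_id < 0, where Python A raises (ZeroDivisionError at task_id = -1, IndexError below);
-- it also excludes replay_buffer_size < 0, outside the natural domain of a buffer size, where A's returned
-- value is an artefact of Python's negative-slice-index wraparound inside del.
def Pre_replay_data_generator (data : List Int) (replay_data : List Int) (replay_buffer_size : Int) (task_id : Int) : Prop :=
  0 ≤ task_id ∧ 0 ≤ replay_buffer_size

instance (data : List Int) (replay_data : List Int) (replay_buffer_size : Int) (task_id : Int) : Decidable (Pre_replay_data_generator data replay_data replay_buffer_size task_id) := by unfold Pre_replay_data_generator; infer_instance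

def pvWitness_replay_data_generator : List Int × List Int × Int × Int := ([7, 8, 9], [1, 2, 3, 4, 5, 6], 6, 2)

def Spec_replay_data_generator (data : List Int) (replay_data : List Int) (replay_buffer_size : Int) (task_id : Int) (out : List Int) : Prop := out = replay_data_generator_alt data replay_data replay_buffer_size task_id
instance (data : List Int) (replay_data : List Int) (replay_buffer_size : Int) (task_id : Int) (out : List Int) : Decidable (Spec_replay_data_generator data replay_data replay_buffer_size task_id out) := by unfold Spec_replay_data_generator; infer_instance

-- ===== CLAIM (what is proved, stated in full; the proofs are below) =====
def Claim_equal_replay_data_generator : Prop := ∀ (data : List Int) (replay_data : List Int) (replay_buffer_size : Int) (task_id : Int), Dom_replay_data_generator data replay_data replay_buffer_size task_id → Pre_replay_data_generator data replay_data replay_buffer_size task_id → Spec_replay_data_generator data replay_data replay_buffer_size task_id (replay_data_generator data replay_data replay_buffer_size task_id)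

-- ===== LEMMAS AND PROOFS =====

-- appending a constant once per element of any list is a replicate
theorem pvFoldlAppendConst {α β : Type} (x : α) :
    ∀ (l : List β) (init : List α),
      l.foldl (fun acc _ => acc ++ [x]) init = init ++ List.replicate l.length x := by
  intro l
  induction l with
  | nil => intro init; simp
  | cons h t ih =>
      intro init
      simp [List.foldl_cons, ih, List.replicate_succ, List.append_assoc]

-- A's size list equals B's closed-form size list (any b, 0 < m)
theorem pvSizesEq (b m : Int) (hm : 0 < m) :
    buffer_indices_generator b m = pvSizes b m := by
  have hr0 : 0 ≤ PySem.Int.mod b m := PySem.Int.mod_nonneg b hm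
  have hrm : PySem.Int.mod b m < m := PySem.Int.mod_lt b hm
  unfold buffer_indices_generator pvSizes
  rw [pvFoldlAppendConst, pvFoldlAppendConst]
  simp only [List.nil_append, PySem.List.length_pyRange_one]
  apply List.ext_getElem
  · simp [PySem.List.length_pyRange_one]; omega
  · intro i h1 h2
    rw [List.getElem_map, PySem.List.getElem_pyRange_one]
    by_cases hc : i < (m - PySem.Int.mod b m - 0).toNat
    · rw [List.getElem_append_left (by simpa using hc)]
      rw [List.getElem_replicate, if_neg (by omega)]
      ring
    · rw [List.getElem_append_right (by simpa using hc)]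
      rw [List.getElem_replicate, if_pos (by omega)]

theorem pvSizesLength (b m : Int) (hm : 0 ≤ m) : (pvSizes b m).length = m.toNat := by
  simp [pvSizes, PySem.List.length_pyRange_one]

-- elementwise: the new (m+1)-way sizes are nonneg and bounded by the old m-way sizes (0 ≤ b)
theorem pvSizesMono (b m : Int) (hb : 0 ≤ b) (hm : 1 ≤ m) (j : Nat) (hj : (j : Int) < m) :
    0 ≤ PySem.List.pyGetD (pvSizes b (m + 1)) (j : Int) 0 ∧
      PySem.List.pyGetD (pvSizes b (m + 1)) (j : Int) 0 ≤
        PySem.List.pyGetD (pvSizes b m) (j : Int) 0 := by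
  have hm1 : (0:Int) < m := by omega
  have hm2 : (0:Int) < m + 1 := by omega
  have e0 := PySem.Int.floordiv_mul_add_mod b m
  have e1 := PySem.Int.floordiv_mul_add_mod b (m + 1)
  have hr0a : 0 ≤ PySem.Int.mod b m := PySem.Int.mod_nonneg b hm1
  have hr0b : PySem.Int.mod b m < m := PySem.Int.mod_lt b hm1
  have hr1a : 0 ≤ PySem.Int.mod b (m + 1) := PySem.Int.mod_nonneg b hm2
  have hr1b : PySem.Int.mod b (m + 1) < m + 1 := PySem.Int.mod_lt b hm2
  have hq1n : 0 ≤ PySem.Int.floordiv b (m + 1) :=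
    (PySem.Int.le_floordiv_iff_mul_le hm2).mpr (by nlinarith)
  have hq0n : 0 ≤ PySem.Int.floordiv b m :=
    (PySem.Int.le_floordiv_iff_mul_le hm1).mpr (by nlinarith)
  have hle : PySem.Int.floordiv b (m + 1) ≤ PySem.Int.floordiv b m :=
    (PySem.Int.le_floordiv_iff_mul_le hm1).mpr (by nlinarith)
  have hj0 : (0:Int) ≤ (j : Int) := by positivity
  unfold pvSizes
  rw [PySem.List.pyGetD_map_pyRange_of_nonneg _ _ _ _ hj0 (by omega),
      PySem.List.pyGetD_map_pyRange_of_nonneg _ _ _ _ hj0 hj]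
  rcases hle.lt_or_eq with h | h
  · constructor <;> split_ifs <;> linarith
  · have hr : PySem.Int.mod b m = PySem.Int.floordiv b m + PySem.Int.mod b (m + 1) := by
      rw [h] at e1
      have hx : PySem.Int.floordiv b m * (m + 1) =
          PySem.Int.floordiv b m * m + PySem.Int.floordiv b m := by ring
      linarith
    constructor <;> split_ifs <;> linarith

-- the loop invariant: A's shifting-cursor deletion fold equals B's rebuild fold plus the untouched tail
def pvInv (rd0 : List Int) (a bb : List Int × Int) : Prop :=
  0 ≤ a.2 ∧ a.2 ≤ bb.2 ∧ ((bb.1.length : Int) ≤ a.2) ∧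
    (bb.2 ≤ (rd0.length : Int) → (bb.1.length : Int) = a.2) ∧
    a.1 = bb.1 ++ rd0.drop bb.2.toNat

theorem pvStep (rd0 : List Int) (a bb : List Int × Int) (n o : Int)
    (hn : 0 ≤ n) (hno : n ≤ o) (h : pvInv rd0 a bb) :
    pvInv rd0
      (a.1.take (PySem.List.clampIdx a.1.length (a.2 + n)) ++
         a.1.drop (max (PySem.List.clampIdx a.1.length (a.2 + n))
           (PySem.List.clampIdx a.1.length (a.2 + n + (o - n)))), a.2 + n)
      (bb.1 ++ PySem.List.slice rd0 (some bb.2) (some (bb.2 + n)), bb.2 + o) := by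
  obtain ⟨h1, h2, h3, h4, h5⟩ := h
  have hb0 : 0 ≤ bb.2 := le_trans h1 h2
  have e : PySem.List.slice rd0 (some bb.2) (some (bb.2 + n)) =
      (rd0.drop bb.2.toNat).take ((bb.2 + n).toNat - bb.2.toNat) :=
    PySem.List.slice_toNat _ hb0 (by omega)
  have htake : bb.1.take (a.2 + n).toNat = bb.1 :=
    List.take_of_length_le (by omega)
  have hdropnil : bb.1.drop (a.2 + n + (o - n)).toNat = [] :=
    List.drop_eq_nil_of_le (by omega)
  refine ⟨by omega, by omega, ?_, ?_, ?_⟩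
  · simp only [e, List.length_append, List.length_take, List.length_drop]
    omega
  · intro hP
    simp only [e, List.length_append, List.length_take, List.length_drop]
    have := h4 (by omega)
    omega
  · dsimp only
    have tmin : ∀ (l : List Int) (s : Nat), l.take (min s l.length) = l.take s := by
      intro l s
      rcases Nat.lt_or_ge l.length s with hs | hs
      · rw [min_eq_right (by omega), List.take_length, List.take_of_length_le (by omega)]
      · rw [min_eq_left hs]
    have dmin : ∀ (l : List Int) (s : Nat), l.drop (min s l.length) = l.drop s := by
      intro l s
      rcases Nat.lt_or_ge l.length s with hs | hs
      · rw [min_eq_right (by omega), List.drop_length,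
            (List.drop_eq_nil_of_le (by omega) : l.drop s = [])]
      · rw [min_eq_left hs]
    have c1 : PySem.List.clampIdx a.1.length (a.2 + n) = min (a.2 + n).toNat a.1.length := by
      rw [show a.2 + n = (((a.2 + n).toNat : Nat) : Int) from (Int.toNat_of_nonneg (by omega)).symm,
          PySem.List.clampIdx_natCast]
      omega
    have c2 : PySem.List.clampIdx a.1.length (a.2 + n + (o - n)) =
        min (a.2 + n + (o - n)).toNat a.1.length := by
      rw [show a.2 + n + (o - n) = (((a.2 + n + (o - n)).toNat : Nat) : Int) from
            (Int.toNat_of_nonneg (by omega)).symm,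
          PySem.List.clampIdx_natCast]
      omega
    have cmax : max (min (a.2 + n).toNat a.1.length) (min (a.2 + n + (o - n)).toNat a.1.length) =
        min (a.2 + n + (o - n)).toNat a.1.length := by omega
    rw [c1, c2, cmax, tmin, dmin, h5, e,
        List.take_append, List.drop_append,
        htake, hdropnil, List.nil_append]
    by_cases hP : bb.2 ≤ (rd0.length : Int)
    · have hlen : (bb.1.length : Int) = a.2 := h4 hP
      have e1 : (a.2 + n).toNat - bb.1.length = n.toNat := by omega
      have e2 : (a.2 + n + (o - n)).toNat - bb.1.length = o.toNat := by omega
      have e3 : (bb.2 + n).toNat - bb.2.toNat = n.toNat := by omega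
      have e4 : (rd0.drop bb.2.toNat).drop o.toNat = rd0.drop (bb.2 + o).toNat := by
        rw [List.drop_drop]
        congr 1
        omega
      rw [e1, e2, e3, e4, List.append_assoc]
    · have d1 : rd0.drop bb.2.toNat = [] := List.drop_eq_nil_of_le (by omega)
      have d2 : rd0.drop (bb.2 + o).toNat = [] := List.drop_eq_nil_of_le (by omega)
      simp [d1, d2]

theorem pvLoopInv (old new rd0 : List Int)
    (hmono : ∀ j : Nat, j < old.length →
      0 ≤ PySem.List.pyGetD new (j : Int) 0 ∧
        PySem.List.pyGetD new (j : Int) 0 ≤ PySem.List.pyGetD old (j : Int) 0) :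
    ∀ ℓ : Nat, ℓ ≤ old.length →
      pvInv rd0
        ((PySem.List.pyRange 0 (ℓ : Int) 1).foldl
          (fun (st : List Int × Int) j =>
            (st.1.take (PySem.List.clampIdx st.1.length (st.2 + PySem.List.pyGetD new j 0)) ++
               st.1.drop (max (PySem.List.clampIdx st.1.length (st.2 + PySem.List.pyGetD new j 0))
                 (PySem.List.clampIdx st.1.length (st.2 + PySem.List.pyGetD new j 0 +
                   (PySem.List.pyGetD old j 0 - PySem.List.pyGetD new j 0)))),
             st.2 + PySem.List.pyGetD new j 0))
          (rd0, 0))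
        ((PySem.List.pyRange 0 (ℓ : Int) 1).foldl
          (fun (st : List Int × Int) j =>
            (st.1 ++ PySem.List.slice rd0 (some st.2)
                       (some (st.2 + PySem.List.pyGetD new j 0)),
             st.2 + PySem.List.pyGetD old j 0))
          (([] : List Int), 0)) := by
  intro ℓ
  induction ℓ with
  | zero =>
      intro _
      simp only [Nat.cast_zero, PySem.List.pyRange_one_eq_nil (le_refl (0 : Int)), List.foldl_nil]
      exact ⟨le_refl 0, le_refl 0, by simp, by simp, by simp⟩
  | succ ℓ ih =>
      intro hℓ
      have hih := ih (by omega)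
      obtain ⟨hn, hno⟩ := hmono ℓ (by omega)
      have hsplit : PySem.List.pyRange 0 ((ℓ + 1 : Nat) : Int) 1 =
          PySem.List.pyRange 0 (ℓ : Int) 1 ++ [(ℓ : Int)] := by
        push_cast
        exact PySem.List.pyRange_one_succ_right (by positivity)
      rw [hsplit, List.foldl_append, List.foldl_append, List.foldl_cons, List.foldl_nil,
          List.foldl_cons, List.foldl_nil]
      exact pvStep rd0 _ _ _ _ hn hno hih

theorem replay_data_generator_spec_aux :
    ∀ (data replay_data : List Int) (b t : Int), 0 ≤ t → 0 ≤ b →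
      replay_data_generator data replay_data b t = replay_data_generator_alt data replay_data b t := by
  intro data rd b t ht hb
  by_cases h0 : t = 0
  · subst h0
    simp [replay_data_generator, replay_data_generator_alt]
  · obtain ⟨ℓ, rfl⟩ : ∃ ℓ : Nat, t = (ℓ : Int) := ⟨t.toNat, (Int.toNat_of_nonneg ht).symm⟩
    have hℓ1 : 1 ≤ ℓ := by
      rcases Nat.eq_zero_or_pos ℓ with h | h
      · exact absurd (by simp [h]) h0
      · omega
    have hbeq : (((ℓ : Int)) == 0) = false := by
      rw [beq_eq_false_iff_ne]
      exact h0
    have hEq1 : buffer_indices_generator b ((ℓ : Int) + 1) = pvSizes b ((ℓ : Int) + 1) :=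
      pvSizesEq b _ (by omega)
    have hEq0 : buffer_indices_generator b ((ℓ : Int)) = pvSizes b ((ℓ : Int)) :=
      pvSizesEq b _ (by exact_mod_cast hℓ1)
    have hlen : (((pvSizes b ((ℓ : Int))).length : Nat) : Int) = (ℓ : Int) := by
      rw [pvSizesLength b _ (by positivity)]
      omega
    have hmono : ∀ j : Nat, j < (pvSizes b ((ℓ : Int))).length →
        0 ≤ PySem.List.pyGetD (pvSizes b ((ℓ : Int) + 1)) (j : Int) 0 ∧
          PySem.List.pyGetD (pvSizes b ((ℓ : Int) + 1)) (j : Int) 0 ≤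
            PySem.List.pyGetD (pvSizes b ((ℓ : Int))) (j : Int) 0 := by
      intro j hj
      rw [pvSizesLength b _ (by positivity)] at hj
      exact pvSizesMono b _ hb (by exact_mod_cast hℓ1) j (by omega)
    have hinv := pvLoopInv (pvSizes b ((ℓ : Int))) (pvSizes b ((ℓ : Int) + 1)) rd hmono ℓ
      (by rw [pvSizesLength b _ (by positivity)]; omega)
    obtain ⟨h1, h2, h3, h4, h5⟩ := hinv
    simp only [replay_data_generator, replay_data_generator_alt, hEq1, hEq0, hbeq,
      Bool.false_eq_true, if_false, hlen,
      show ((ℓ : Int) + 1 - 1) = (ℓ : Int) by ring]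
    rw [h5, PySem.List.slice_from _ (le_trans h1 h2), List.append_assoc]

-- ===== VERDICT (by name: the statement is the Claim_ definition above) =====
theorem replay_data_generator_spec : Claim_equal_replay_data_generator := by
  intro data replay_data b t _ hpre
  exact replay_data_generator_spec_aux data replay_data b t hpre.1 hpre.2
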